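-- pv_equiv track=rewrite | github.com/rodrigoneal/bludv-addons | src/util/scraper.py | iter_posts
-- ===== SOURCE A (Python) =====
-- import itertools
--
-- def iter_posts(posts: list[list])-> list[str]:
--     posts = list(itertools.chain.from_iterable(posts))
--     iterador = iter(posts)
--     while True:
--         grupo = list(itertools.islice(iterador, 4))
--         if not grupo:
--             break
--         yield grupo
-- ===== SOURCE B (Python) =====
-- def iter_posts(posts):
--     grupo = []
--     for sub in posts:
--         for x in sub:
--             grupo.append(x)
--             if len(grupo) == 4:
--                 yield grupo
--                 grupo = []
--     if grupo:
--         yield grupo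
-- ===== Notes on version B (the rewrite author's own statement) =====
-- stated objective: simpler
-- what changed: Single streaming pass with an explicit 4-element buffer yielded and reset on the fly, instead of materialising the flattened list and chunking it with iter/islice.
import Mathlib
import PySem

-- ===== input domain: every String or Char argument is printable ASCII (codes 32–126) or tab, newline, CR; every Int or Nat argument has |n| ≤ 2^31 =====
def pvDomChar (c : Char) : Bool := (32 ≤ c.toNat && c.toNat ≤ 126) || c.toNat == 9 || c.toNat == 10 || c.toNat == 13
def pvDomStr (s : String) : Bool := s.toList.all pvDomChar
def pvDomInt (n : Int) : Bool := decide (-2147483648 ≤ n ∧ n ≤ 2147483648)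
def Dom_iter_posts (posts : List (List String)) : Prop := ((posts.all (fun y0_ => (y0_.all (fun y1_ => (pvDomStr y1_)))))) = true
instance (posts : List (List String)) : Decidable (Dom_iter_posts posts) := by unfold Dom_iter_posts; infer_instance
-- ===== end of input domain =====

-- B replaces flatten-then-islice-chunking by one streaming pass with an explicit 4-element buffer (simpler decomposition; same asymptotic cost).


-- ===== PORT A =====
-- the while-loop: repeatedly slice the next 4 elements off the iterator, stop when empty
def iterChunksA : List String → List (List String)
  | [] => []
  | x :: xs => ((x :: xs).take 4) :: iterChunksA ((x :: xs).drop 4)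
  termination_by l => l.length
  decreasing_by simp [List.drop]

-- itertools.chain.from_iterable = flatten, then the chunking while-loop
def iter_posts (posts : List (List String)) : List (List String) :=
  iterChunksA posts.flatten

-- ===== PORT B =====
-- inner loop body: append x to grupo; if it reached 4, yield it and reset
def altStep (st : List (List String) × List String) (x : String) : List (List String) × List String :=
  let g := st.2 ++ [x]
  if g.length == 4 then (st.1 ++ [g], []) else (st.1, g)

def iter_posts_alt (posts : List (List String)) : List (List String) :=
  let st := posts.foldl (fun st sub => sub.foldl altStep st) ([], [])
  if st.2.isEmpty then st.1 else st.1 ++ [st.2]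

-- ===== PRECONDITION & SPEC =====
def Spec_iter_posts (posts : List (List String)) (out : List (List String)) : Prop := out = iter_posts_alt posts
instance (posts : List (List String)) (out : List (List String)) : Decidable (Spec_iter_posts posts out) := by unfold Spec_iter_posts; infer_instance

-- ===== CLAIM (what is proved, stated in full; the proofs are below) =====
def Claim_equal_iter_posts : Prop := ∀ (posts : List (List String)), Dom_iter_posts posts → Spec_iter_posts posts (iter_posts posts)

-- ===== LEMMAS AND PROOFS =====

theorem iterChunksA_nil : iterChunksA [] = [] := by rw [iterChunksA]

theorem iterChunksA_cons (x : String) (xs : List String) :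
    iterChunksA (x :: xs) = ((x :: xs).take 4) :: iterChunksA ((x :: xs).drop 4) := by
  rw [iterChunksA]

-- a full 4-element group at the front is exactly the first chunk
theorem chunk_full (g l : List String) (hg : g.length = 4) :
    iterChunksA (g ++ l) = g :: iterChunksA l := by
  cases g with
  | nil => simp at hg
  | cons z zs =>
    rw [List.cons_append, iterChunksA_cons, ← List.cons_append]
    rw [List.take_append, List.drop_append, hg]
    simp [List.take_of_length_le (le_of_eq hg), List.drop_of_length_le (le_of_eq hg)]

-- the buffered single pass over l, starting from (acc, grupo) with grupo not yet full,
-- produces acc ++ the chunks of grupo ++ l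
theorem altStep_key (l : List String) (acc : List (List String)) (grupo : List String)
    (h : grupo.length < 4) :
    (if (l.foldl altStep (acc, grupo)).2.isEmpty then (l.foldl altStep (acc, grupo)).1
     else (l.foldl altStep (acc, grupo)).1 ++ [(l.foldl altStep (acc, grupo)).2])
    = acc ++ iterChunksA (grupo ++ l) := by
  induction l generalizing acc grupo with
  | nil =>
    cases grupo with
    | nil => simp [iterChunksA_nil]
    | cons y ys =>
      have h1 : (y :: ys).take 4 = y :: ys := List.take_of_length_le (by omega)
      have h2 : (y :: ys).drop 4 = [] := List.drop_of_length_le (by omega)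
      simp [iterChunksA_cons, h1, h2, iterChunksA_nil]
  | cons x xs ih =>
    simp only [List.foldl, altStep]
    have hsplit : grupo ++ x :: xs = (grupo ++ [x]) ++ xs := by simp
    by_cases hl : ((grupo ++ [x]).length == 4) = true
    · rw [if_pos hl]
      rw [hsplit, chunk_full _ _ (by simpa using hl)]
      have := ih (acc ++ [grupo ++ [x]]) [] (by simp)
      simp only [List.nil_append] at this
      rw [this]
      simp
    · rw [if_neg hl]
      rw [hsplit]
      refine ih acc (grupo ++ [x]) ?_
      simp only [beq_iff_eq] at hl
      simp at hl ⊢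
      omega

-- ===== VERDICT (by name: the statement is the Claim_ definition above) =====
theorem iter_posts_spec : Claim_equal_iter_posts := by
  intro posts _
  unfold Spec_iter_posts iter_posts iter_posts_alt
  rw [← List.foldl_flatten]
  have := altStep_key posts.flatten [] [] (by simp)
  simp only [List.nil_append] at this
  exact this.symm
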